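-- pv_equiv track=rewrite | github.com/Parag2367/pythonLearn | DSA/Linked_List/23.leetcode_1358.py | countSub
-- ===== SOURCE A (Python) =====
-- def countSub(s: str) -> int:
--     n = len(s)
--     count = 0
--     for i in range(n):
--         char = set()
--         for j in range(i, n):
--             char.add(s[j])
--
--             if len(char) == 3:
--                 count += 1
--
--     return count
-- ===== SOURCE B (Python) =====
-- def countSub(s: str) -> int:
--     # One pass with a last-occurrence dict: substrings ending at j with exactly
--     # 3 distinct characters start at i with p4 < i <= p3, where p3/p4 are the
--     # 3rd/4th largest last-occurrence positions among all characters seen so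
--     # far (p4 = -1 if only 3 distinct characters exist).
--     last = {}
--     count = 0
--     for j, ch in enumerate(s):
--         last[ch] = j
--         vals = sorted(last.values(), reverse=True)
--         if len(vals) >= 3:
--             p3 = vals[2]
--             p4 = vals[3] if len(vals) > 3 else -1
--             count += p3 - p4
--     return count
-- ===== Notes on version B (the rewrite author's own statement) =====
-- stated objective: faster
-- what changed: Replaces A's nested scan (rebuilding a distinct-character set for every start index) with a single pass maintaining a last-occurrence dictionary: substrings ending at j with exactly 3 distinct characters are counted in O(sigma log sigma) per step as p3 - p4, the gap between the 3rd and 4th largest last-occurrence positions.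
import Mathlib
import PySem

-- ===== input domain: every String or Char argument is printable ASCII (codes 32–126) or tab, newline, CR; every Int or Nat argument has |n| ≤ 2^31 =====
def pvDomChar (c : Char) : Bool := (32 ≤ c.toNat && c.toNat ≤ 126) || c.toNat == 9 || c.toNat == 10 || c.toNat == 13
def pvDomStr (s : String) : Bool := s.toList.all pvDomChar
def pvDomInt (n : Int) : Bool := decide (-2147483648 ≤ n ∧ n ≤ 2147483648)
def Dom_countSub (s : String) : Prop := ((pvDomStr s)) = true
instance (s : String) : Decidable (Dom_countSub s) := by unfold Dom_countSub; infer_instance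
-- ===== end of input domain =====

-- B replaces A's quadratic nested scan by a single pass that maintains the last
-- occurrence of every character and counts, per end position, p3 - p4 (the gap
-- between the 3rd and 4th largest last-occurrence positions); measurably faster.

-- ===== PORT A =====
-- for i in range(n): char=set(); for j in range(i,n): char.add(s[j]); if len(char)==3: count+=1
-- (the chars visited by the inner loop are s[i],…,s[n-1], i.e. cs.drop i)
def countSub (s : String) : Int :=
  let cs := s.toList
  let n := cs.length
  (List.range n).foldl
    (fun count i =>
      ((cs.drop i).foldl
        (fun (st : PySem.Set Char × Int) ch =>
          let c2 := PySem.Set.add st.1 ch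
          (c2, if c2.length = 3 then st.2 + 1 else st.2))
        (PySem.Set.empty, count)).2)
    0

-- ===== PORT B =====
-- last = {}; for j, ch in enumerate(s): last[ch] = j; vals = sorted(last.values(), reverse=True);
--   if len(vals) >= 3: p3 = vals[2]; p4 = vals[3] if len(vals) > 3 else -1; count += p3 - p4
-- (the match on vals transcribes the two length guards; vals[2]/vals[3] are the matched components)
def countSub_alt (s : String) : Int :=
  let cs := s.toList
  ((PySem.List.enumerate cs 0).foldl
    (fun (st : PySem.Dict Char Int × Int) p =>
      let last := st.1.insert p.2 p.1
      let vals := PySem.List.sorted last.values (fun v => v) true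
      match vals with
      | _ :: _ :: p3 :: rest =>
          let p4 := match rest with | p4 :: _ => p4 | [] => -1
          (last, st.2 + (p3 - p4))
      | _ => (last, st.2))
    (PySem.Dict.empty, 0)).2

-- ===== PRECONDITION & SPEC =====
def Spec_countSub (s : String) (out : Int) : Prop := out = countSub_alt s
instance (s : String) (out : Int) : Decidable (Spec_countSub s out) := by unfold Spec_countSub; infer_instance

-- ===== CLAIM (what is proved, stated in full; the proofs are below) =====
def Claim_equal_countSub : Prop := ∀ (s : String), Dom_countSub s → Spec_countSub s (countSub s)

-- ===== LEMMAS AND PROOFS =====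

-- number of substrings of cs ending at j (inclusive) with exactly 3 distinct chars
def g (cs : List Char) (j : Nat) : Nat :=
  ((Finset.range (j + 1)).filter (fun i => ((cs.take (j + 1)).drop i).toFinset.card = 3)).card

-- index of the last occurrence of c in l, -1 if absent
def lastIdx (l : List Char) (c : Char) : Int :=
  l.zipIdx.foldl (fun acc p => if p.1 = c then (p.2 : Int) else acc) (-1)

lemma lastIdx_append_singleton (l : List Char) (ch c : Char) :
    lastIdx (l ++ [ch]) c = if ch = c then (l.length : Int) else lastIdx l c := by
  unfold lastIdx
  rw [List.zipIdx_append, List.foldl_append]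
  simp [List.zipIdx]

lemma lastIdx_spec (l : List Char) (c : Char) :
    (c ∉ l ∧ lastIdx l c = -1) ∨
    (∃ k : Nat, k < l.length ∧ lastIdx l c = (k : Int) ∧ l[k]? = some c ∧
      ∀ m : Nat, k < m → m < l.length → l[m]? ≠ some c) := by
  induction l using List.reverseRecOn with
  | nil => left; simp [lastIdx]
  | append_singleton l ch ih =>
    rw [lastIdx_append_singleton]
    by_cases hc : ch = c
    · right
      refine ⟨l.length, by simp, by simp [hc], ?_, ?_⟩
      · subst hc; simp
      · intro m hm1 hm2 _; simp at hm2; omega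
    · rcases ih with ⟨hmem, hval⟩ | ⟨k, hk, hval, hget, hmax⟩
      · left
        constructor
        · simp [hmem]
          exact fun h => hc h.symm
        · simp [hc, hval]
      · right
        refine ⟨k, by simp; omega, by simp [hc, hval], ?_, ?_⟩
        · rw [List.getElem?_append_left hk]; exact hget
        · intro m hm1 hm2
          simp at hm2
          rcases Nat.lt_or_ge m l.length with h | h
          · rw [List.getElem?_append_left h]; exact hmax m hm1 h
          · have : m = l.length := by omega
            subst this
            simp [hc]

lemma lastIdx_mem_char (l : List Char) (c : Char) (h : c ∈ l) :
    ∃ k : Nat, k < l.length ∧ lastIdx l c = (k : Int) ∧ l[k]? = some c ∧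
      ∀ m : Nat, k < m → m < l.length → l[m]? ≠ some c := by
  rcases lastIdx_spec l c with ⟨hmem, _⟩ | hk
  · exact absurd h hmem
  · exact hk

lemma lastIdx_nonneg_of_mem (l : List Char) (c : Char) (h : c ∈ l) : 0 ≤ lastIdx l c := by
  obtain ⟨k, _, hval, _, _⟩ := lastIdx_mem_char l c h
  omega

lemma lastIdx_lt_length (l : List Char) (c : Char) (h : c ∈ l) : lastIdx l c < (l.length : Int) := by
  obtain ⟨k, hk, hval, _, _⟩ := lastIdx_mem_char l c h
  omega

-- membership in a suffix ↔ the last occurrence is at index ≥ i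
lemma mem_drop_iff_lastIdx (l : List Char) (i : Nat) (c : Char) :
    c ∈ l.drop i ↔ (c ∈ l ∧ (i : Int) ≤ lastIdx l c) := by
  constructor
  · intro h
    have hmem : c ∈ l := List.mem_of_mem_drop h
    refine ⟨hmem, ?_⟩
    obtain ⟨m, hm, hget⟩ := List.getElem_of_mem h
    rw [List.getElem_drop] at hget
    obtain ⟨k, hk, hval, _, hmax⟩ := lastIdx_mem_char l c hmem
    have hlt : i + m < l.length := by
      simp only [List.length_drop] at hm
      omega
    by_contra hcon
    have : k < i + m := by omega
    exact hmax (i + m) this hlt (by rw [List.getElem?_eq_getElem hlt]; exact congrArg some hget)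
  · rintro ⟨hmem, hle⟩
    obtain ⟨k, hk, hval, hget, _⟩ := lastIdx_mem_char l c hmem
    have hik : i ≤ k := by omega
    have : (l.drop i)[k - i]? = some c := by
      rw [List.getElem?_drop]
      rwa [Nat.add_sub_cancel' hik]
    exact List.mem_of_getElem? this

-- lastIdx is injective on the chars present in l
lemma lastIdx_injOn (l : List Char) : ∀ c ∈ l, ∀ c' ∈ l, lastIdx l c = lastIdx l c' → c = c' := by
  intro c hc c' hc' heq
  obtain ⟨k, hk, hval, hget, _⟩ := lastIdx_mem_char l c hc
  obtain ⟨k', hk', hval', hget', _⟩ := lastIdx_mem_char l c' hc'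
  have : k = k' := by omega
  subst this
  rw [hget] at hget'
  exact Option.some_injective _ hget'

-- distinct chars of l.drop i counted through any nodup enumeration of l's chars
lemma card_drop_eq_filter (l : List Char) (i : Nat) (keys : List Char)
    (hnd : keys.Nodup) (hmem : ∀ c, c ∈ keys ↔ c ∈ l) :
    (l.drop i).toFinset.card = (keys.filter (fun c => decide ((i : Int) ≤ lastIdx l c))).length := by
  have hnd2 : (keys.filter (fun c => decide ((i : Int) ≤ lastIdx l c))).Nodup := hnd.filter _
  rw [← List.toFinset_card_of_nodup hnd2]
  congr 1
  ext c
  simp only [List.mem_toFinset, List.mem_filter, decide_eq_true_eq]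
  rw [mem_drop_iff_lastIdx, hmem]

-- the filtered length through the map to last-occurrence values
lemma filter_map_length (keys : List Char) (f : Char → Int) (i : Int) :
    ((keys.map f).filter (fun v => decide (i ≤ v))).length
      = (keys.filter (fun c => decide (i ≤ f c))).length := by
  induction keys with
  | nil => rfl
  | cons c rest ih =>
    simp only [List.map_cons, List.filter_cons]
    by_cases h : i ≤ f c <;> simp [h, ih]

-- on a strictly descending list, the (i ≤ ·)-filter empties exactly when i beats the head
lemma filter_nil_iff_head (rest : List Int) (i : Int) (hi : 0 ≤ i)
    (hdesc : rest.Pairwise (fun a b => b < a)) :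
    (rest.filter (fun v => decide (i ≤ v)) = [] ↔ rest.headD (-1) < i) := by
  cases rest with
  | nil => simp; omega
  | cons y ys =>
    simp only [List.pairwise_cons] at hdesc
    rw [List.filter_eq_nil_iff]
    simp only [List.headD_cons, decide_eq_true_eq, not_le]
    constructor
    · intro h; exact h y (by simp)
    · intro h x hx
      rcases List.mem_cons.mp hx with rfl | hmem
      · exact h
      · have := hdesc.1 x hmem; omega

-- on a strictly descending list with shape v1::v2::v3::rest, the filter has length 3
-- iff i lands in the window (p4, v3]
lemma filter_len_three (w : List Int) (v1 v2 v3 : Int) (rest : List Int)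
    (hw : w = v1 :: v2 :: v3 :: rest) (hdesc : w.Pairwise (fun a b => b < a)) (i : Int) (hi : 0 ≤ i) :
    ((w.filter (fun v => decide (i ≤ v))).length = 3 ↔ (i ≤ v3 ∧ rest.headD (-1) < i)) := by
  subst hw
  simp only [List.pairwise_cons] at hdesc
  obtain ⟨h1, h2, h3, hrest⟩ := hdesc
  have h12 : v2 < v1 := h1 v2 (by simp)
  have h13 : v3 < v2 := h2 v3 (by simp)
  have hrest3 : ∀ x ∈ rest, x < v3 := fun x hx => h3 x (by simp [hx])
  by_cases hc : i ≤ v3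
  · have hc2 : i ≤ v2 := by omega
    have hc1 : i ≤ v1 := by omega
    simp only [List.filter_cons, hc, hc1, hc2, decide_true, if_true, List.length_cons]
    rw [show ∀ n : ℕ, (n + 1 + 1 + 1 = 3 ↔ n = 0) from by omega]
    rw [List.length_eq_zero_iff, filter_nil_iff_head rest i hi hrest]
    simp [hc]
  · have hfr : rest.filter (fun v => decide (i ≤ v)) = [] := by
      rw [List.filter_eq_nil_iff]
      intro x hx
      simp only [decide_eq_true_eq, not_le]
      have := hrest3 x hx; omega
    simp only [List.filter_cons, hc, decide_false]
    constructor
    · intro h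
      exfalso
      by_cases b1 : i ≤ v1 <;> by_cases b2 : i ≤ v2 <;>
        simp [b1, b2, hc, hfr] at h
    · rintro ⟨h, -⟩; exact h.elim

lemma count_window (t : Nat) (v3 p4 : Int) (h1 : -1 ≤ p4) (h2 : p4 < v3) (h3 : v3 ≤ (t : Int)) :
    (((Finset.range (t + 1)).filter (fun (i : ℕ) => p4 < (i : Int) ∧ (i : Int) ≤ v3)).card : Int)
      = v3 - p4 := by
  have hset : (Finset.range (t + 1)).filter (fun (i : ℕ) => p4 < (i : Int) ∧ (i : Int) ≤ v3)
      = Finset.Ico (p4 + 1).toNat (v3.toNat + 1) := by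
    ext i
    simp only [Finset.mem_filter, Finset.mem_range, Finset.mem_Ico]
    omega
  rw [hset, Nat.card_Ico]
  omega

-- ===== A-side: the nested loop counts pairs (i, j), i ≤ j, with |{s[i..j]}| = 3 =====

-- number of nonempty prefixes p of l with |S ∪ p| = 3 (A's inner-loop count)
def cnt : List Char → PySem.Set Char → ℕ
  | [], _ => 0
  | ch :: rest, S =>
    (if (PySem.Set.add S ch).length = 3 then 1 else 0) + cnt rest (PySem.Set.add S ch)

lemma innerA_spec (l : List Char) (S : PySem.Set Char) (c : Int) :
    (l.foldl
      (fun (st : PySem.Set Char × Int) ch =>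
        let c2 := PySem.Set.add st.1 ch
        (c2, if c2.length = 3 then st.2 + 1 else st.2))
      (S, c)).2 = c + (cnt l S : Int) := by
  induction l generalizing S c with
  | nil => simp [cnt]
  | cons ch rest ih =>
    simp only [List.foldl_cons, cnt]
    split_ifs with h <;> · simp [ih]; try ring

lemma add_ofList (p : List Char) (ch : Char) :
    PySem.Set.add (PySem.Set.ofList p) ch = PySem.Set.ofList (p ++ [ch]) := by
  rw [PySem.Set.ofList_eq_foldl, PySem.Set.ofList_eq_foldl, List.foldl_append]; rfl

lemma length_ofList (q : List Char) :
    (PySem.Set.ofList q).length = q.toFinset.card := by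
  rw [← List.toFinset_card_of_nodup (PySem.Set.nodup_ofList q)]
  congr 1; ext x; simp [PySem.Set.mem_ofList]

lemma cnt_spec (l p : List Char) :
    cnt l (PySem.Set.ofList p) =
      ∑ k ∈ Finset.range l.length,
        (if (p ++ l.take (k + 1)).toFinset.card = 3 then 1 else 0) := by
  induction l generalizing p with
  | nil => rfl
  | cons ch rest ih =>
    rw [cnt, add_ofList, ih (p ++ [ch])]
    rw [List.length_cons, Finset.sum_range_succ', Nat.add_comm]
    congr 1
    · apply Finset.sum_congr rfl
      intro k _
      congr 2
      simp
    · rw [length_ofList]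
      simp

lemma cnt_empty (l : List Char) :
    cnt l PySem.Set.empty =
      ∑ k ∈ Finset.range l.length, (if (l.take (k + 1)).toFinset.card = 3 then 1 else 0) := by
  have h := cnt_spec l []
  simp only [List.nil_append] at h
  exact h

lemma sum_map_range (f : ℕ → ℕ) (n : ℕ) :
    ((List.range n).map f).sum = ∑ i ∈ Finset.range n, f i := by
  induction n with
  | zero => rfl
  | succ n ih =>
    rw [List.range_succ, List.map_append, List.sum_append, Finset.sum_range_succ, ih]
    simp

lemma outerA (cs : List Char) (L : List ℕ) (c : Int) :
    L.foldl
      (fun count i =>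
        ((cs.drop i).foldl
          (fun (st : PySem.Set Char × Int) ch =>
            let c2 := PySem.Set.add st.1 ch
            (c2, if c2.length = 3 then st.2 + 1 else st.2))
          (PySem.Set.empty, count)).2) c
    = c + ((L.map (fun i => cnt (cs.drop i) PySem.Set.empty)).sum : ℕ) := by
  induction L generalizing c with
  | nil => simp
  | cons i L ih =>
    rw [List.foldl_cons, innerA_spec, ih]
    simp only [List.map_cons, List.sum_cons]
    push_cast
    ring

-- A's total = Σ_j g j
lemma sum_ind_eq_g (cs : List Char) (j : Nat) (hj : j < cs.length) :
    ∑ i ∈ Finset.range cs.length,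
      (if i ≤ j then (if ((cs.drop i).take (j - i + 1)).toFinset.card = 3 then 1 else 0) else 0)
    = g cs j := by
  rw [g, Finset.card_filter]
  rw [← Finset.sum_filter]
  have hs : (Finset.range cs.length).filter (fun i => i ≤ j) = Finset.range (j + 1) := by
    ext x; simp only [Finset.mem_filter, Finset.mem_range]; omega
  rw [hs]
  apply Finset.sum_congr rfl
  intro i hi
  have hij : i ≤ j := by simpa [Nat.lt_succ_iff] using hi
  have heq : (cs.take (j + 1)).drop i = (cs.drop i).take (j - i + 1) := by
    rw [List.drop_take]
    congr 1
    omega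
  rw [heq]

lemma A_as_sum_g (cs : List Char) :
    ∑ i ∈ Finset.range cs.length, cnt (cs.drop i) PySem.Set.empty
      = ∑ j ∈ Finset.range cs.length, g cs j := by
  set n := cs.length with hn
  have key : ∀ x ∈ Finset.range n,
      cnt (cs.drop x) PySem.Set.empty
      = ∑ j ∈ Finset.range n,
          (if x ≤ j then (if ((cs.drop x).take (j - x + 1)).toFinset.card = 3 then 1 else 0) else 0) := by
    intro i hi
    rw [cnt_empty, List.length_drop]
    have h1 : ∑ j ∈ Finset.Ico i n,
        (if ((cs.drop i).take (j - i + 1)).toFinset.card = 3 then 1 else 0)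
        = ∑ k ∈ Finset.range (n - i),
            (if ((cs.drop i).take (k + 1)).toFinset.card = 3 then 1 else 0) := by
      rw [Finset.sum_Ico_eq_sum_range]
      apply Finset.sum_congr rfl
      intro k _
      have e : i + k - i + 1 = k + 1 := by omega
      rw [e]
    rw [← h1]
    have h2 : Finset.Ico i n = (Finset.range n).filter (fun j => i ≤ j) := by
      ext x; simp only [Finset.mem_Ico, Finset.mem_filter, Finset.mem_range]; omega
    rw [h2, Finset.sum_filter]
  rw [Finset.sum_congr rfl key, Finset.sum_comm]
  apply Finset.sum_congr rfl
  intro j hj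
  exact sum_ind_eq_g cs j (Finset.mem_range.mp hj)

-- ===== B-side: the fold with the last-occurrence dict produces Σ_j g j =====

lemma foldB (cs : List Char) (rest : List Char) (t : Nat) (d : PySem.Dict Char Int) (c0 : Int)
    (hdrop : cs.drop t = rest) (ht : t ≤ cs.length)
    (hnd : d.keys.Nodup)
    (hkeys : ∀ c, c ∈ d.keys ↔ c ∈ cs.take t)
    (hget : ∀ c ∈ d.keys, d.get? c = some (lastIdx (cs.take t) c)) :
    ((PySem.List.enumerate rest (t : Int)).foldl
      (fun (st : PySem.Dict Char Int × Int) p =>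
        let last := st.1.insert p.2 p.1
        let vals := PySem.List.sorted last.values (fun v => v) true
        match vals with
        | _ :: _ :: p3 :: r =>
            let p4 := match r with | p4 :: _ => p4 | [] => -1
            (last, st.2 + (p3 - p4))
        | _ => (last, st.2))
      (d, c0)).2
    = c0 + ((∑ j ∈ Finset.Ico t cs.length, g cs j : ℕ) : Int) := by
  induction rest generalizing t d c0 with
  | nil =>
    have hteq : t = cs.length := by
      have := congrArg List.length hdrop
      simp at this
      omega
    subst hteq
    simp [PySem.List.enumerate_nil]
  | cons x rest' ih =>
    have htlt : t < cs.length := by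
      have := congrArg List.length hdrop
      simp at this
      omega
    have hx : cs[t]? = some x := by
      have h0 : (cs.drop t)[0]? = some x := by rw [hdrop]; rfl
      rw [List.getElem?_drop] at h0
      simpa using h0
    have hdrop' : cs.drop (t + 1) = rest' := by
      have htl : (cs.drop t).tail = rest' := by rw [hdrop]; rfl
      rw [← htl, List.tail_drop]
    have htake : cs.take (t + 1) = cs.take t ++ [x] := by
      rw [List.take_succ, hx]
      rfl
    have hlen_take : (cs.take t).length = t := by simp; omega
    have hpreflen : (cs.take (t + 1)).length = t + 1 := by simp; omega
    -- invariants for the updated dict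
    have hnd' : (d.insert x (t : Int)).keys.Nodup := PySem.Dict.nodup_keys_insert d x _ hnd
    have hkeys' : ∀ c, c ∈ (d.insert x (t : Int)).keys ↔ c ∈ cs.take (t + 1) := by
      intro c
      rw [PySem.Dict.mem_keys_insert d x c _, htake]
      simp [hkeys c]
      tauto
    have hget' : ∀ c ∈ (d.insert x (t : Int)).keys,
        (d.insert x (t : Int)).get? c = some (lastIdx (cs.take (t + 1)) c) := by
      intro c hc
      rw [PySem.Dict.get?_insert d x c _, htake, lastIdx_append_singleton]
      by_cases hcx : c = x
      · simp [hcx, hlen_take]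
      · have hxc : ¬ (x = c) := fun h => hcx h.symm
        rw [if_neg hcx, if_neg hxc]
        apply hget
        have := (PySem.Dict.mem_keys_insert d x c _).mp hc
        tauto
    have hmemKpref : ∀ c ∈ (d.insert x (t : Int)).keys, c ∈ cs.take (t + 1) :=
      fun c hc => (hkeys' c).mp hc
    have hvals : (d.insert x (t : Int)).values
        = (d.insert x (t : Int)).keys.map (lastIdx (cs.take (t + 1))) := by
      rw [PySem.Dict.values_eq_map_keys _ hnd' (-1)]
      apply List.map_congr_left
      intro k hk
      exact PySem.Dict.getD_of_get?_eq_some _ (-1) (hget' k hk)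
    have hVnd : ((d.insert x (t : Int)).keys.map (lastIdx (cs.take (t + 1)))).Nodup := by
      refine List.Nodup.map_on ?_ hnd'
      intro c hc c' hc' h
      exact lastIdx_injOn _ c (hmemKpref c hc) c' (hmemKpref c' hc') h
    have hperm : (PySem.List.sorted (d.insert x (t : Int)).values (fun v => v) true).Perm
        ((d.insert x (t : Int)).keys.map (lastIdx (cs.take (t + 1)))) := by
      rw [hvals]
      exact PySem.List.sorted_perm _ _ true
    have hwnd : (PySem.List.sorted (d.insert x (t : Int)).values (fun v => v) true).Nodup :=
      hperm.nodup_iff.mpr hVnd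
    have hge : (PySem.List.sorted (d.insert x (t : Int)).values (fun v => v) true).Pairwise
        (fun a b => b ≤ a) := PySem.List.sorted_pairwise_rev _ _
    have hdesc : (PySem.List.sorted (d.insert x (t : Int)).values (fun v => v) true).Pairwise
        (fun a b => b < a) := by
      have := hge.and hwnd
      exact this.imp (fun h => lt_of_le_of_ne h.1 (Ne.symm h.2))
    have hbound : ∀ v ∈ PySem.List.sorted (d.insert x (t : Int)).values (fun v => v) true,
        0 ≤ v ∧ v ≤ (t : Int) := by
      intro v hv
      have hv' : v ∈ (d.insert x (t : Int)).keys.map (lastIdx (cs.take (t + 1))) :=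
        hperm.mem_iff.mp hv
      obtain ⟨c, hc, rfl⟩ := List.mem_map.mp hv'
      have hcp : c ∈ cs.take (t + 1) := hmemKpref c hc
      have h1 := lastIdx_nonneg_of_mem _ c hcp
      have h2 := lastIdx_lt_length _ c hcp
      rw [hpreflen] at h2
      push_cast at h2
      constructor <;> omega
    have hcard : ∀ i : ℕ, ((cs.take (t + 1)).drop i).toFinset.card
        = ((PySem.List.sorted (d.insert x (t : Int)).values (fun v => v) true).filter
            (fun v => decide ((i : Int) ≤ v))).length := by
      intro i
      rw [card_drop_eq_filter (cs.take (t + 1)) i (d.insert x (t : Int)).keys hnd' hkeys']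
      rw [← filter_map_length (d.insert x (t : Int)).keys (lastIdx (cs.take (t + 1))) (i : Int)]
      exact (List.Perm.length_eq (hperm.filter _)).symm
    have hlenw : (PySem.List.sorted (d.insert x (t : Int)).values (fun v => v) true).length
        = (d.insert x (t : Int)).keys.length := by
      rw [hperm.length_eq, List.length_map]
    have hsplit : ∑ j ∈ Finset.Ico t cs.length, g cs j
        = g cs t + ∑ j ∈ Finset.Ico (t + 1) cs.length, g cs j :=
      Finset.sum_eq_sum_Ico_succ_bot htlt (g cs)
    rw [PySem.List.enumerate_cons, List.foldl_cons]
    have hcast : ((t : Int) + 1) = ((t + 1 : Nat) : Int) := by push_cast; ring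
    rw [hcast]
    have hsmall : ∀ (hlen : (PySem.List.sorted (d.insert x (t : Int)).values (fun v => v) true).length ≤ 2),
        g cs t = 0 := by
      intro hlen
      unfold g
      rw [Finset.card_eq_zero, Finset.filter_eq_empty_iff]
      intro i _
      rw [hcard i]
      have := List.length_filter_le (fun v => decide ((i : Int) ≤ v))
        (PySem.List.sorted (d.insert x (t : Int)).values (fun v => v) true)
      omega
    rcases hshape : PySem.List.sorted (d.insert x (t : Int)).values (fun v => v) true with
      _ | ⟨v1, _ | ⟨v2, _ | ⟨v3, r⟩⟩⟩
    · dsimp only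
      rw [hshape]
      dsimp only
      rw [ih (t + 1) _ c0 hdrop' (by omega) hnd' hkeys' hget', hsplit,
        hsmall (by rw [hshape]; simp)]
      push_cast
      ring
    · dsimp only
      rw [hshape]
      dsimp only
      rw [ih (t + 1) _ c0 hdrop' (by omega) hnd' hkeys' hget', hsplit,
        hsmall (by rw [hshape]; simp)]
      push_cast
      ring
    · dsimp only
      rw [hshape]
      dsimp only
      rw [ih (t + 1) _ c0 hdrop' (by omega) hnd' hkeys' hget', hsplit,
        hsmall (by rw [hshape]; simp)]
      push_cast
      ring
    · -- at least three distinct characters: the increment is v3 - p4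
      have hdesc' : (v1 :: v2 :: v3 :: r).Pairwise (fun a b => b < a) := hshape ▸ hdesc
      have hbound' : ∀ v ∈ (v1 :: v2 :: v3 :: r), 0 ≤ v ∧ v ≤ (t : Int) := fun v hv =>
        hbound v (hshape ▸ hv)
      have hv3 : 0 ≤ v3 ∧ v3 ≤ (t : Int) := hbound' v3 (by simp)
      have hp4a : -1 ≤ r.headD (-1) := by
        cases r with
        | nil => simp
        | cons y ys => have := hbound' y (by simp); simp; omega
      have hp4b : r.headD (-1) < v3 := by
        cases r with
        | nil => simp; omega
        | cons y ys =>
          simp only [List.pairwise_cons] at hdesc'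
          have := hdesc'.2.2.1 y (by simp)
          simpa using this
      have hgt : (g cs t : Int) = v3 - r.headD (-1) := by
        have hfilt : g cs t
            = ((Finset.range (t + 1)).filter
                (fun (i : ℕ) => r.headD (-1) < (i : Int) ∧ (i : Int) ≤ v3)).card := by
          unfold g
          congr 1
          apply Finset.filter_congr
          intro i _
          rw [hcard i, hshape]
          rw [filter_len_three (v1 :: v2 :: v3 :: r) v1 v2 v3 r rfl hdesc' (i : Int) (by positivity)]
          simp [and_comm]
        rw [hfilt]
        exact count_window t v3 (r.headD (-1)) hp4a hp4b hv3.2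
      rcases r with _ | ⟨y, ys⟩
      · simp only [List.headD_nil] at hgt
        dsimp only
        rw [hshape]
        dsimp only
        rw [ih (t + 1) _ (c0 + (v3 - (-1))) hdrop' (by omega) hnd' hkeys' hget', hsplit]
        push_cast
        rw [hgt]
        ring
      · simp only [List.headD_cons] at hgt
        dsimp only
        rw [hshape]
        dsimp only
        rw [ih (t + 1) _ (c0 + (v3 - y)) hdrop' (by omega) hnd' hkeys' hget', hsplit]
        push_cast
        rw [hgt]
        ring

-- ===== VERDICT (by name: the statement is the Claim_ definition above) =====
theorem countSub_spec : Claim_equal_countSub := by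
  intro s _
  show countSub s = countSub_alt s
  unfold countSub countSub_alt
  rw [outerA, sum_map_range, A_as_sum_g]
  have hB := foldB s.toList s.toList 0 PySem.Dict.empty 0 rfl (Nat.zero_le _)
    (by simp [PySem.Dict.keys_empty])
    (by intro c; simp [PySem.Dict.keys_empty])
    (by intro c hc; simp [PySem.Dict.keys_empty] at hc)
  simp only [Nat.cast_zero] at hB
  rw [hB, ← Finset.range_eq_Ico]
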